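-- pv_equiv track=rewrite | github.com/NOTfedos/Pulkovo | web-site/server.py | get_alp
-- ===== SOURCE A (Python) =====
-- import string
-- from itertools import product, chain
--
-- def get_alp(n):
--     limit, digits = 1, 0
--     while n >= limit:
--         digits += 1
--         limit *= 26
--     alp = list()
--     for prod in product(' ' + string.ascii_uppercase, repeat=digits):
--         if n >= 0:
--             alp.append(''.join(prod))
--             n -= 1
--         else:
--             break
--     return alp
-- ===== SOURCE B (Python) =====
-- import string
--
-- def get_alp(n):
--     limit, digits = 1, 0
--     while n >= limit:
--         digits += 1
--         limit *= 26
--     alphabet = ' ' + string.ascii_uppercase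
--     res = []
--     for i in range(n + 1):
--         chars = []
--         x = i
--         for _ in range(digits):
--             x, r = divmod(x, 27)
--             chars.append(alphabet[r])
--         res.append(''.join(reversed(chars)))
--     return res
-- ===== Notes on version B (the rewrite author's own statement) =====
-- stated objective: alternative
-- what changed: Replaces the itertools.product enumeration with a counter-and-break over 27^digits tuples by an independent closed-form base-27 conversion of each index i in range(n+1) (space as zero digit), keeping only the digit-width while-loop.
import Mathlib
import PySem

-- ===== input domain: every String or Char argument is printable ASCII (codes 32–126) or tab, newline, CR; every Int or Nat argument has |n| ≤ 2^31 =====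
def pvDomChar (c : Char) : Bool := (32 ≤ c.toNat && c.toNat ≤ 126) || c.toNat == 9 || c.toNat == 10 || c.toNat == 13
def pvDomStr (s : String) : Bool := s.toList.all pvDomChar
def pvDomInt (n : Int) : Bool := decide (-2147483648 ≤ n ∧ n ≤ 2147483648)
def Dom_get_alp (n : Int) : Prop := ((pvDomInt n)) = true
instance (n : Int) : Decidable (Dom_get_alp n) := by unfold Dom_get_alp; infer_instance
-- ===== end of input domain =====

-- B replaces the itertools.product enumeration with an independent base-27 conversion
-- of each index (space as zero digit); an alternative algorithm of the same cost.

-- shared alphabet ' ' + string.ascii_uppercase (identical constant in both sources)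
def pvAlphabet : List Char := " ABCDEFGHIJKLMNOPQRSTUVWXYZ".toList

-- the while-loop 'while n >= limit: digits += 1; limit *= 26' (identical in both sources)
-- (the conjunct 0 < limit only makes the recursion total; at the call site limit
-- starts at 1 and stays positive, so the condition is Python's 'n >= limit')
def pvDigitsLoop (n limit : Int) (d : Nat) : Nat :=
  if limit ≤ n ∧ 0 < limit then pvDigitsLoop n (limit * 26) (d + 1) else d
termination_by (n - limit + 1).toNat
decreasing_by omega

-- ===== PORT A =====
-- itertools.product(' ' + ascii_uppercase, repeat=digits), leftmost slot slowest
def pvProduct : Nat → List (List Char)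
  | 0 => [[]]
  | Nat.succ d => pvAlphabet.flatMap (fun c => (pvProduct d).map (fun t => c :: t))

-- the for-loop with the 'if n >= 0 … n -= 1 … else break'
def pvALoop : List (List Char) → Int → List String → List String
  | [], _, alp => alp
  | p :: ps, n, alp => if n ≥ 0 then pvALoop ps (n - 1) (alp ++ [String.ofList p]) else alp

def get_alp (n : Int) : List String :=
  pvALoop (pvProduct (pvDigitsLoop n 1 0)) n []

-- ===== PORT B =====
-- the inner 'for _ in range(digits): x, r = divmod(x, 27); chars.append(alphabet[r])'
-- (alphabet[r] via pyGetD: r = x % 27 is always in range 0..26)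
def pvConvGo : Nat → Int → List Char → List Char
  | 0, _, chars => chars
  | Nat.succ d, x, chars =>
      pvConvGo d (PySem.Int.floordiv x 27)
        (chars ++ [PySem.List.pyGetD pvAlphabet (PySem.Int.mod x 27) ' '])

def get_alp_alt (n : Int) : List String :=
  let digits := pvDigitsLoop n 1 0
  (PySem.List.pyRange 0 (n + 1) 1).foldl
    (fun res i => res ++ [String.ofList (pvConvGo digits i []).reverse]) []

-- ===== PRECONDITION & SPEC =====
def Spec_get_alp (n : Int) (out : List String) : Prop := out = get_alp_alt n
instance (n : Int) (out : List String) : Decidable (Spec_get_alp n out) := by unfold Spec_get_alp; infer_instance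

-- ===== CLAIM (what is proved, stated in full; the proofs are below) =====
def Claim_equal_get_alp : Prop := ∀ (n : Int), Dom_get_alp n → Spec_get_alp n (get_alp n)

-- ===== LEMMAS AND PROOFS =====

-- spec-side width-d base-27 digit string of k, most significant first
def pvConv : Nat → Nat → List Char
  | 0, _ => []
  | Nat.succ d, k => pvConv d (k / 27) ++ [pvAlphabet.getD (k % 27) ' ']

theorem pvConvGo_append (d : Nat) (x : Int) (chars : List Char) :
    pvConvGo d x chars = chars ++ pvConvGo d x [] := by
  induction d generalizing x chars with
  | zero => simp [pvConvGo]
  | succ d ih =>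
      rw [pvConvGo, pvConvGo, ih,
        ih (PySem.Int.floordiv x 27) ([] ++ [PySem.List.pyGetD pvAlphabet (PySem.Int.mod x 27) ' '])]
      simp

theorem pvConvGo_reverse (d : Nat) (k : Nat) :
    (pvConvGo d (k : Int) []).reverse = pvConv d k := by
  induction d generalizing k with
  | zero => simp [pvConvGo, pvConv]
  | succ d ih =>
      have h1 : PySem.Int.floordiv (k : Int) 27 = ((k / 27 : Nat) : Int) := by
        exact_mod_cast PySem.Int.floordiv_natCast k 27
      have h2 : PySem.Int.mod (k : Int) 27 = ((k % 27 : Nat) : Int) := by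
        exact_mod_cast PySem.Int.mod_natCast k 27
      rw [pvConvGo, pvConvGo_append, h1, h2, List.nil_append, List.reverse_append, ih,
        PySem.List.pyGetD_natCast]
      simp [pvConv]

theorem pvRange_group (m b : Nat) (f : Nat → List Char) :
    (List.range (m * b)).map f
      = (List.range m).flatMap (fun j => (List.range b).map (fun k => f (j * b + k))) := by
  induction m with
  | zero => simp
  | succ m ih =>
      have : (m + 1) * b = m * b + b := by ring
      rw [this, List.range_add, List.map_append, ih, List.range_succ]
      simp [Nat.add_comm]

theorem pvConv_split (d : Nat) (j k : Nat) (hj : j < 27) (hk : k < 27 ^ d) :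
    pvConv (d + 1) (j * 27 ^ d + k) = pvAlphabet.getD j ' ' :: pvConv d k := by
  induction d generalizing k with
  | zero =>
      have hk0 : k = 0 := by omega
      subst hk0
      have hj1 : j * 27 ^ 0 + 0 = j := by ring
      rw [hj1]
      show pvConv (0 + 1) j = _
      simp [pvConv, Nat.mod_eq_of_lt hj]
  | succ d ih =>
      have hpow : (27 : Nat) ^ (d + 1) = 27 * 27 ^ d := by ring
      have hmul : j * 27 ^ (d + 1) = 27 * (j * 27 ^ d) := by rw [hpow]; ring
      have hkd : k / 27 < 27 ^ d := by omega
      have hdiv : (j * 27 ^ (d + 1) + k) / 27 = j * 27 ^ d + k / 27 := by omega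
      have hmod : (j * 27 ^ (d + 1) + k) % 27 = k % 27 := by omega
      show pvConv (d + 1 + 1) _ = _
      rw [pvConv, hdiv, hmod, ih _ hkd]
      rfl

theorem pvProduct_eq (d : Nat) :
    pvProduct d = (List.range (27 ^ d)).map (pvConv d) := by
  induction d with
  | zero => simp [pvProduct, pvConv]
  | succ d ih =>
      have halp : pvAlphabet = (List.range 27).map (fun j => pvAlphabet.getD j ' ') := by decide
      rw [pvProduct, ih]
      conv_lhs => rw [halp]
      rw [List.flatMap_map]
      have hpow : 27 ^ (d + 1) = 27 * 27 ^ d := by ring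
      rw [hpow, pvRange_group 27 (27 ^ d) (pvConv (d + 1))]
      apply List.flatMap_congr
      intro j hj
      rw [List.map_map]
      apply List.map_congr_left
      intro k hk
      simp only [List.mem_range] at hj hk
      simp [Function.comp, pvConv_split d j k hj hk]

theorem pvALoop_eq (ps : List (List Char)) (n : Int) (alp : List String)
    (h : (n + 1).toNat ≤ ps.length) :
    pvALoop ps n alp = alp ++ (ps.take (n + 1).toNat).map String.ofList := by
  induction ps generalizing n alp with
  | nil =>
      have : (n + 1).toNat = 0 := by simpa using h
      simp [pvALoop, this]
  | cons p ps ih =>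
      rw [pvALoop]
      by_cases hn : n ≥ 0
      · have h1 : (n + 1).toNat = n.toNat + 1 := by omega
        have h2 : (n - 1 + 1).toNat = n.toNat := by omega
        rw [if_pos hn, ih (n - 1) _ (by simp at h; omega)]
        simp [h1]
      · have h0 : (n + 1).toNat = 0 := by omega
        rw [if_neg hn]
        simp [h0]

theorem pvDigitsLoop_bound (n limit : Int) (d : Nat) (hl : 0 < limit) :
    ∃ e, pvDigitsLoop n limit d = d + e ∧ n < limit * (26 : Int) ^ e := by
  rw [pvDigitsLoop]
  by_cases h : limit ≤ n ∧ 0 < limit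
  · rw [if_pos h]
    obtain ⟨e, he, hlt⟩ := pvDigitsLoop_bound n (limit * 26) (d + 1) (by omega)
    exact ⟨e + 1, by omega, by rw [pow_succ]; nlinarith [pow_pos (by norm_num : (0:Int) < 26) e]⟩
  · have hnl : n < limit := by omega
    exact ⟨0, by rw [if_neg h]; simp, by simpa using hnl⟩
termination_by (n - limit + 1).toNat
decreasing_by omega

theorem get_alp_eq_alt (n : Int) : get_alp n = get_alp_alt n := by
  rw [get_alp, get_alp_alt]
  set d := pvDigitsLoop n 1 0 with hd
  have hbound : (n + 1).toNat ≤ 27 ^ d := by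
    obtain ⟨e, he, hlt⟩ := pvDigitsLoop_bound n 1 0 (by omega)
    rw [one_mul] at hlt
    have hde : d = e := by omega
    have h1 : n < ((26 ^ d : Nat) : Int) := by rw [hde]; exact_mod_cast hlt
    have h2 : (26 : Nat) ^ d ≤ 27 ^ d := Nat.pow_le_pow_left (by norm_num) d
    have h3 : 0 < (27 : Nat) ^ d := by positivity
    omega
  rw [pvProduct_eq, pvALoop_eq _ _ _ (by simpa using hbound)]
  rw [← List.map_take, List.take_range, Nat.min_eq_left hbound]
  rw [PySem.List.foldl_append_singleton_eq_map, PySem.List.pyRange_one]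
  have : n + 1 - 0 = n + 1 := by ring
  rw [this]
  simp only [List.map_map, List.nil_append, List.map_map]
  apply List.map_congr_left
  intro k hk
  simp [Function.comp, pvConvGo_reverse d k]

-- ===== VERDICT (by name: the statement is the Claim_ definition above) =====
theorem get_alp_spec : Claim_equal_get_alp := by
  intro n _
  unfold Spec_get_alp
  exact get_alp_eq_alt n
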